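-- pv_equiv track=rewrite | github.com/kishwarshafin/pepper | pepper_variant/modules/python/CandidateFinder.py | sequence_to_repvec
-- ===== SOURCE A (Python) =====
-- def sequence_to_repvec(sequence):
--     """
--     Implemented from: https://jszym.com/blog/dna_protein_complexity/
--     Computes the repetition vector (as seen in Wooton, 1993) from a
--     given sequence of a biopolymer with `N` possible residues.
--
--     :param sequence: the nucleotide or protein sequence to generate a repetition vector for.
--     """
--     encountered_homopolymers = set()
--     repvec = []
--
--     for base in sequence:
--         if base not in encountered_homopolymers:
--             residue_count = sequence.count(base)
--
--             repvec.append(residue_count)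
--
--             encountered_homopolymers.add(base)
--
--         if len(encountered_homopolymers) == 4:
--             break
--
--     while len(repvec) < 4:
--         repvec.append(0)
--
--     return sorted(repvec, reverse=True)
-- ===== SOURCE B (Python) =====
-- def sequence_to_repvec(sequence):
--     def go(seq, k):
--         if k == 0:
--             return []
--         if not seq:
--             return [0] * k
--         rest = [x for x in seq if x != seq[0]]
--         return [len(seq) - len(rest)] + go(rest, k - 1)
--     return sorted(go(list(sequence), 4), reverse=True)
-- ===== Notes on version B (the rewrite author's own statement) =====
-- stated objective: alternative
-- what changed: Replaces A's set-tracking loop with per-residue full-string .count scans and a while-padding loop by a 4-deep filter-and-remove recursion: each step takes the head residue, counts it as the length drop of filtering it out, and recurses on the filtered remainder, so no set, no dict and no separate count or padding pass exist.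
import Mathlib
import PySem

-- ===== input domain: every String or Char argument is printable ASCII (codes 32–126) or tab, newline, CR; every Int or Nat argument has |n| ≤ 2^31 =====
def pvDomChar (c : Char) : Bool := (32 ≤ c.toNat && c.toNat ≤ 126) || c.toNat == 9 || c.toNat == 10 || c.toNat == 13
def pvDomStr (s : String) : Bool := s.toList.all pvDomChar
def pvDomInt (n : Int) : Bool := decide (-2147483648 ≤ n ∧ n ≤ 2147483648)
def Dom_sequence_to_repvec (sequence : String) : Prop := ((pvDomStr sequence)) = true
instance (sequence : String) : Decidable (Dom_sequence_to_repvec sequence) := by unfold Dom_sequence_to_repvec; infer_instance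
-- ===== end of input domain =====

-- B replaces A's set-tracking loop with per-residue full-string count scans and a while-padding
-- loop by a 4-deep filter-and-remove recursion (count = length drop of filtering out the head
-- residue); objective: alternative, same cost.

-- ===== PORT A =====
-- the for-loop of A with its 'break': stops as soon as 4 distinct residues were encountered
def seqALoop (seq : List Char) : List Char → PySem.Set Char → List Int → List Int
  | [], _, repvec => repvec
  | base :: rest, enc, repvec =>
      let st :=
        if PySem.Set.contains enc base = false then
          (PySem.Set.add enc base, repvec ++ [((seq.count base : Nat) : Int)])
        else (enc, repvec)
      if st.1.length = 4 then st.2 else seqALoop seq rest st.1 st.2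

-- the 'while len(repvec) < 4: repvec.append(0)' loop
def padALoop (r : List Int) : List Int :=
  if r.length < 4 then padALoop (r ++ [0]) else r
termination_by 4 - r.length
decreasing_by simp; omega

def sequence_to_repvec (sequence : String) : List Int :=
  PySem.List.sorted (padALoop (seqALoop sequence.toList sequence.toList PySem.Set.empty []))
    (fun x => x) true

-- ===== PORT B =====
-- inner 'go(seq, k)': count the head residue as the length drop of filtering it out, recurse on the rest
def goB : List Char → Nat → List Int
  | _, 0 => []
  | [], k + 1 => List.replicate (k + 1) 0
  | c :: t, k + 1 =>
      let rest := (c :: t).filter (fun x => x ≠ c)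
      (((c :: t).length - rest.length : Nat) : Int) :: goB rest k

def sequence_to_repvec_alt (sequence : String) : List Int :=
  PySem.List.sorted (goB sequence.toList 4) (fun x => x) true

-- ===== PRECONDITION & SPEC =====
def Spec_sequence_to_repvec (sequence : String) (out : List Int) : Prop := out = sequence_to_repvec_alt sequence
instance (sequence : String) (out : List Int) : Decidable (Spec_sequence_to_repvec sequence out) := by unfold Spec_sequence_to_repvec; infer_instance

-- ===== CLAIM (what is proved, stated in full; the proofs are below) =====
def Claim_equal_sequence_to_repvec : Prop := ∀ (sequence : String), Dom_sequence_to_repvec sequence → Spec_sequence_to_repvec sequence (sequence_to_repvec sequence)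

-- ===== LEMMAS AND PROOFS =====

-- first occurrences in `rest` of residues not already in `enc`, in order
def newOccs (enc : PySem.Set Char) : List Char → List Char
  | [] => []
  | c :: rest =>
      if PySem.Set.contains enc c then newOccs enc rest
      else c :: newOccs (PySem.Set.add enc c) rest

lemma newOccs_congr (t : List Char) (e1 e2 : PySem.Set Char)
    (h : ∀ x, x ∈ e1 ↔ x ∈ e2) : newOccs e1 t = newOccs e2 t := by
  induction t generalizing e1 e2 with
  | nil => rfl
  | cons c t ih =>
    simp only [newOccs]
    by_cases hm : c ∈ e1
    · simp [PySem.Set.contains, hm, (h c).1 hm, ih e1 e2 h]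
    · have hm2 : c ∉ e2 := fun hc => hm ((h c).2 hc)
      have h' : ∀ x, x ∈ (e1 ++ [c] : List Char) ↔ x ∈ (e2 ++ [c] : List Char) := by
        intro x; simp [h x]
      simp [PySem.Set.contains, PySem.Set.add, hm, hm2, ih _ _ h']

lemma mem_newOccs {x : Char} (t : List Char) (enc : PySem.Set Char)
    (hx : x ∈ newOccs enc t) : x ∈ t := by
  induction t generalizing enc with
  | nil => simp [newOccs] at hx
  | cons c t ih =>
    simp only [newOccs] at hx
    by_cases hm : c ∈ enc
    · simp [PySem.Set.contains, hm] at hx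
      exact List.mem_cons_of_mem _ (ih _ hx)
    · simp [PySem.Set.contains, hm] at hx
      rcases hx with h | h
      · simp [h]
      · exact List.mem_cons_of_mem _ (ih _ h)

lemma newOccs_append_filter (t : List Char) (enc : PySem.Set Char) (c : Char) :
    newOccs (enc ++ [c]) t = newOccs enc (t.filter (fun x => x ≠ c)) := by
  induction t generalizing enc with
  | nil => rfl
  | cons d t ih =>
    by_cases hdc : d = c
    · subst hdc
      simp only [newOccs, List.filter_cons]
      simp [PySem.Set.contains, ih]
    · simp only [newOccs, List.filter_cons]
      by_cases hm : d ∈ enc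
      · simp [PySem.Set.contains, hm, hdc, ih, newOccs]
      · have hne : d ∉ enc ++ [c] := by simp [hm, hdc]
        simp [hdc, newOccs, PySem.Set.contains, PySem.Set.add, hne, hm]
        rw [show (enc ++ [c, d] : List Char) = enc ++ [c] ++ [d] from by simp,
            newOccs_congr t (enc ++ [c] ++ [d]) (enc ++ [d] ++ [c]) (by intro x; simp; tauto)]
        have := ih (enc ++ [d])
        simpa using this

lemma filter_ne_length (l : List Char) (c : Char) :
    (l.filter (fun x => x ≠ c)).length + l.count c = l.length := by
  induction l with
  | nil => simp
  | cons d t ih =>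
    by_cases h : d = c
    · subst h; simp only [List.filter_cons, List.count_cons]
      simp only [ne_eq, decide_not] at ih ⊢
      simp; omega
    · simp only [List.filter_cons, List.count_cons]
      simp only [ne_eq, decide_not] at ih ⊢
      simp [h]; omega

lemma count_filter_ne (l : List Char) (c d : Char) (h : d ≠ c) :
    (l.filter (fun x => x ≠ c)).count d = l.count d := by
  induction l with
  | nil => simp
  | cons e t ih =>
    simp only [List.filter_cons]
    simp only [ne_eq, decide_not] at ih ⊢
    by_cases he : e = c
    · subst he; simp [List.count_cons, Ne.symm h, ih]
    · simp [he, List.count_cons, ih]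

lemma goB_eq (k : Nat) (L : List Char) :
    goB L k = ((newOccs PySem.Set.empty L).take k).map (fun c => ((L.count c : Nat) : Int))
      ++ List.replicate (k - (newOccs PySem.Set.empty L).length) 0 := by
  induction k generalizing L with
  | zero => simp [goB]
  | succ k ih =>
    cases L with
    | nil => simp [goB, newOccs]
    | cons c t =>
      have hrest : (c :: t).filter (fun x => x ≠ c) = t.filter (fun x => x ≠ c) := by
        simp
      have hN : newOccs PySem.Set.empty (c :: t)
          = c :: newOccs PySem.Set.empty (t.filter (fun x => x ≠ c)) := by
        have h1 : newOccs PySem.Set.empty (c :: t)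
            = c :: newOccs (([] : List Char) ++ [c]) t := by
          simp [newOccs, PySem.Set.empty, PySem.Set.contains, PySem.Set.add]
        rw [h1, newOccs_append_filter]
        rfl
      have hcount : t.length + 1 - ((c :: t).filter (fun x => x ≠ c)).length
          = (c :: t).count c := by
        have := filter_ne_length (c :: t) c
        simp only [List.length_cons] at this
        omega
      simp only [goB, hrest, hN, List.take_succ_cons, List.map_cons, List.length_cons]
      rw [ih (t.filter (fun x => x ≠ c))]
      congr 1
      · rw [← hrest]
        exact congrArg _ hcount
      congr 1
      · apply List.map_congr_left
        intro d hd
        have hd' : d ∈ newOccs PySem.Set.empty (t.filter (fun x => x ≠ c)) :=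
          List.mem_of_mem_take hd
        have hdm : d ∈ t.filter (fun x => x ≠ c) := mem_newOccs _ _ hd'
        have hdc : d ≠ c := by
          have := List.of_mem_filter hdm
          simpa using this
        rw [count_filter_ne _ _ _ hdc, List.count_cons]
        simp [Ne.symm hdc]
      · congr 1
        omega

lemma seqALoop_eq (seq rest : List Char) (enc : PySem.Set Char) (repvec : List Int)
    (h : enc.length < 4) :
    seqALoop seq rest enc repvec =
      repvec ++ ((newOccs enc rest).take (4 - enc.length)).map
        (fun c => ((seq.count c : Nat) : Int)) := by
  induction rest generalizing enc repvec with
  | nil => simp [seqALoop, newOccs]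
  | cons c rest ih =>
    simp only [seqALoop, newOccs]
    by_cases hm : c ∈ enc
    · have hne : ¬ enc.length = 4 := by omega
      simp [hm, hne, ih enc repvec h]
    · have hadd : PySem.Set.add enc c = enc ++ [c] := by simp [PySem.Set.add, hm]
      have hlen : (PySem.Set.add enc c).length = enc.length + 1 := by simp [hadd]
      by_cases h4 : enc.length = 3
      · simp [hm, h4]
      · have hlt : (PySem.Set.add enc c).length < 4 := by omega
        simp [hm]
        rw [if_neg h4, ih (enc ++ [c]) _ (by simpa [hadd] using hlt)]
        have htk' : 4 - enc.length = (4 - (enc ++ [c]).length) + 1 := by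
          simp; omega
        rw [htk', List.take_succ_cons, List.map_take]
        simp

lemma padALoop_eq (r : List Int) : padALoop r = r ++ List.replicate (4 - r.length) 0 := by
  rw [padALoop]
  split
  · rename_i hlt
    rw [padALoop_eq (r ++ [0])]
    have h1 : 4 - r.length = (4 - (r ++ [0]).length) + 1 := by simp; omega
    rw [h1, List.replicate_succ, List.append_assoc]
    rfl
  · rename_i hge
    have h0 : 4 - r.length = 0 := by omega
    simp [h0]
termination_by 4 - r.length
decreasing_by simp; omega

-- ===== VERDICT (by name: the statement is the Claim_ definition above) =====
theorem sequence_to_repvec_spec : Claim_equal_sequence_to_repvec := by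
  intro s _
  show sequence_to_repvec s = sequence_to_repvec_alt s
  unfold sequence_to_repvec sequence_to_repvec_alt
  rw [seqALoop_eq _ _ _ _ (by simp [PySem.Set.empty]), padALoop_eq, goB_eq]
  have hlen : ((List.take (4 - (PySem.Set.empty : PySem.Set Char).length)
      (newOccs PySem.Set.empty s.toList)).map
      (fun c => ((s.toList.count c : Nat) : Int))).length
      = min 4 (newOccs PySem.Set.empty s.toList).length := by
    simp [PySem.Set.empty]
  simp only [PySem.Set.empty, List.length_nil, Nat.sub_zero, List.nil_append] at *
  congr 1
  congr 1
  simp only [List.length_map, List.length_take, Nat.min_def]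
  split_ifs with h
  · rw [Nat.sub_self, Nat.sub_eq_zero_of_le h]
  · rfl
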